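-- pv_equiv track=rewrite | github.com/MarkSon-42/SAFFY10thAlgorithm | Minwoo/0511/[SW 문제해결 기본] 1일차 - Flatten(오답 코드).py | flattern_boxes
-- ===== SOURCE A (Python) =====
-- def flattern_boxes(test_cases):
--     output = []
--
--     for i, (dump_count, heights) in enumerate(test_cases, 1):
--         # 상자들 높이 정렬하기
--         sorted_heights = sorted(heights)
--
--         # 반복문을 통해 주어진 덤프 숫자 만큼 평탄화 하기
--         for _ in range(dump_count):
--             # 최고 높이 박스를 최소 높이 박스로 덤핑
--             sorted_heights[0] += 1
--             sorted_heights[-1] -= 1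
--
--             # 다음 반복문 되풀이를 위해 다시 정렬 ( 갱신 )
--             sorted_heights.sort()
--
--             # 높이 차이 계산
--             diff = sorted_heights[-1] - sorted_heights[0]
--
--             # 높이차가 1 혹은 그 아래면 더 평탄화 할 필요 없으니 break
--             if diff <= 1:
--                 break
--         output.append((i, diff))
--
--     return output
-- ===== SOURCE B (Python) =====
-- def flattern_boxes(test_cases):
--     output = []
--
--     for i, (dump_count, heights) in enumerate(test_cases, 1):
--         if dump_count >= 1:
--             # bucket-count the heights once; track current min/max in O(1) per dump
--             cnt = {}
--             for h in heights:
--                 cnt[h] = cnt.get(h, 0) + 1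
--             lo = min(heights)
--             hi = max(heights)
--             n = len(heights)
--             for _ in range(dump_count):
--                 if n == 1:
--                     diff = 0
--                     break
--                 if lo == hi:
--                     cnt[lo] -= 2
--                     cnt[lo + 1] = cnt.get(lo + 1, 0) + 1
--                     cnt[lo - 1] = cnt.get(lo - 1, 0) + 1
--                     hi = lo + 1
--                     lo = lo - 1
--                 else:
--                     cnt[lo] -= 1
--                     cnt[lo + 1] = cnt.get(lo + 1, 0) + 1
--                     cnt[hi] -= 1
--                     cnt[hi - 1] = cnt.get(hi - 1, 0) + 1
--                     if cnt[lo] == 0: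
--                         lo = lo + 1
--                     if cnt[hi] == 0:
--                         hi = hi - 1
--                 diff = hi - lo
--                 if diff <= 1:
--                     break
--         output.append((i, diff))
--
--     return output
-- ===== Notes on version B (the rewrite author's own statement) =====
-- stated objective: faster
-- what changed: Instead of re-sorting the whole list after every dump, B bucket-counts the heights once per case and moves one unit between the min and max buckets in O(1) per dump, tracking the current min/max directly.
import Mathlib
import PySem

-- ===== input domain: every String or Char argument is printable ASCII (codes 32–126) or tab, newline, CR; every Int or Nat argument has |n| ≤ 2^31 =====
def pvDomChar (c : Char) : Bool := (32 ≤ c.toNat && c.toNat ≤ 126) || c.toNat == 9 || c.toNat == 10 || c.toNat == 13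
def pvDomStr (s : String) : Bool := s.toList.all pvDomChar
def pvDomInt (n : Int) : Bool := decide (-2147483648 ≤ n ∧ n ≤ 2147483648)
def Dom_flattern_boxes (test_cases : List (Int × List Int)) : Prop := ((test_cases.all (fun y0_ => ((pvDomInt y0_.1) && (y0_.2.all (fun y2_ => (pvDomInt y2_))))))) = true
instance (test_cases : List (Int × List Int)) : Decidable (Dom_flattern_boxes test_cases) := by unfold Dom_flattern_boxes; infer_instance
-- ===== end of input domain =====

-- B replaces A's sort-per-dump simulation by a bucket counter with tracked min/max (O(1) per dump
-- instead of a sort); like A it leaves `diff` unset until a dump runs, so later zero/negative-dump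
-- cases report the previous case's diff exactly as A does.

-- ===== PORT A =====
-- sorted_heights[0] += 1; sorted_heights[-1] -= 1  (on [] Python raises IndexError: outside Pre_)
def pvBumpA (s : List Int) : List Int :=
  match s with
  | [] => []
  | a :: t =>
    let u := (a + 1) :: t
    u.dropLast ++ [u.getLast?.getD 0 - 1]

-- for _ in range(dump_count): … break  — diff is threaded as Option Int (None = not yet assigned)
def pvLoopA : Nat → List Int → Option Int → Option Int
  | 0, _, diff => diff
  | k + 1, s, _ =>
    let s' := PySem.List.sorted (pvBumpA s) (fun x => x) false
    let d := s'.getLast?.getD 0 - s'.head?.getD 0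
    if d ≤ 1 then some d else pvLoopA k s' (some d)

-- outer loop over enumerate(test_cases, 1); appending an unset diff (Python NameError) yields 0 here (outside Pre_)
def pvGoA : List (Int × List Int) → Int → Option Int → List (Int × Int)
  | [], _, _ => []
  | (d, hs) :: rest, i, diff =>
    let diff' := pvLoopA d.toNat (PySem.List.sorted hs (fun x => x) false) diff
    (i, diff'.getD 0) :: pvGoA rest (i + 1) diff'

def flattern_boxes (test_cases : List (Int × List Int)) : List (Int × Int) :=
  pvGoA test_cases 1 none

-- ===== PORT B =====
-- one dump in O(1): move a unit out of the lo and hi buckets, re-track lo/hi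
def pvLoopB : Nat → PySem.Dict Int Int → Int → Int → Int → Option Int → Option Int
  | 0, _, _, _, _, diff => diff
  | k + 1, cnt, lo, hi, n, _ =>
    if n = 1 then some 0
    else if lo = hi then
      let cnt1 := cnt.insert lo (cnt.getD lo 0 - 2)
      let cnt2 := cnt1.insert (lo + 1) (cnt1.getD (lo + 1) 0 + 1)
      let cnt3 := cnt2.insert (lo - 1) (cnt2.getD (lo - 1) 0 + 1)
      let hi' := lo + 1
      let lo' := lo - 1
      let d := hi' - lo'
      if d ≤ 1 then some d else pvLoopB k cnt3 lo' hi' n (some d)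
    else
      let cnt1 := cnt.insert lo (cnt.getD lo 0 - 1)
      let cnt2 := cnt1.insert (lo + 1) (cnt1.getD (lo + 1) 0 + 1)
      let cnt3 := cnt2.insert hi (cnt2.getD hi 0 - 1)
      let cnt4 := cnt3.insert (hi - 1) (cnt3.getD (hi - 1) 0 + 1)
      let lo' := if cnt4.getD lo 0 = 0 then lo + 1 else lo
      let hi' := if cnt4.getD hi 0 = 0 then hi - 1 else hi
      let d := hi' - lo'
      if d ≤ 1 then some d else pvLoopB k cnt4 lo' hi' n (some d)

-- outer loop of B: build the counter and min/max only when at least one dump will run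
def pvGoB : List (Int × List Int) → Int → Option Int → List (Int × Int)
  | [], _, _ => []
  | (d, hs) :: rest, i, diff =>
    let diff' :=
      if 1 ≤ d then
        let cnt := hs.foldl (fun c h => c.insert h (c.getD h 0 + 1)) (PySem.Dict.empty)
        let lo := (PySem.List.min? hs (fun x => x)).getD 0
        let hi := (PySem.List.max? hs (fun x => x)).getD 0
        pvLoopB d.toNat cnt lo hi (hs.length : Int) diff
      else diff
    (i, diff'.getD 0) :: pvGoB rest (i + 1) diff'

def flattern_boxes_alt (test_cases : List (Int × List Int)) : List (Int × Int) :=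
  pvGoB test_cases 1 none

-- ===== PRECONDITION & SPEC =====
-- Pre_ is exactly the set of inputs on which Python A returns: a case with dump_count ≥ 1 must have
-- nonempty heights (else IndexError), and a case with dump_count ≤ 0 must be preceded by a case with
-- dump_count ≥ 1 (else `diff` was never assigned and Python raises NameError).
def Pre_flattern_boxes (test_cases : List (Int × List Int)) : Prop :=
  ∀ k, k < test_cases.length →
    (1 ≤ (test_cases.getD k (0, [])).1 → (test_cases.getD k (0, [])).2 ≠ []) ∧
    ((test_cases.getD k (0, [])).1 ≤ 0 → ∃ j, j < k ∧ 1 ≤ (test_cases.getD j (0, [])).1)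
instance (test_cases : List (Int × List Int)) : Decidable (Pre_flattern_boxes test_cases) := by
  unfold Pre_flattern_boxes; infer_instance

def pvWitness_flattern_boxes : (List (Int × List Int)) := [(2, [1, 3, 7]), (0, [5]), (9, [2, 2])]

def Spec_flattern_boxes (test_cases : List (Int × List Int)) (out : List (Int × Int)) : Prop :=
  out = flattern_boxes_alt test_cases
instance (test_cases : List (Int × List Int)) (out : List (Int × Int)) : Decidable (Spec_flattern_boxes test_cases out) := by
  unfold Spec_flattern_boxes; infer_instance

-- ===== CLAIM (what is proved, stated in full; the proofs are below) =====
def Claim_equal_flattern_boxes : Prop := ∀ (test_cases : List (Int × List Int)), Dom_flattern_boxes test_cases → Pre_flattern_boxes test_cases → Spec_flattern_boxes test_cases (flattern_boxes test_cases)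

-- ===== LEMMAS AND PROOFS =====

-- a sorted list starts with any element that is a lower bound
theorem pvSortedHead {l : List Int} {v : Int} (hs : l.Sorted (· ≤ ·))
    (hm : v ∈ l) (hlb : ∀ x ∈ l, v ≤ x) : l.head? = some v := by
  cases l with
  | nil => cases hm
  | cons a t =>
    have h1 : v ≤ a := hlb a (List.mem_cons_self)
    have h2 : a ≤ v := by
      rcases List.mem_cons.mp hm with h | h
      · omega
      · exact (List.sorted_cons.mp hs).1 v h
    simp [le_antisymm h2 h1]

-- a sorted list ends with any element that is an upper bound
theorem pvSortedLast {l : List Int} {v : Int} (hs : l.Sorted (· ≤ ·))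
    (hm : v ∈ l) (hub : ∀ x ∈ l, x ≤ v) : l.getLast? = some v := by
  induction l with
  | nil => cases hm
  | cons a t ih =>
    cases t with
    | nil => simp_all
    | cons b t' =>
      have hvt : v ∈ b :: t' := by
        rcases List.mem_cons.mp hm with h | h
        · subst h
          have h1 : v ≤ b := (List.sorted_cons.mp hs).1 b (List.mem_cons_self)
          have h2 : b ≤ v := hub b (by simp)
          have : b = v := by omega
          simp [this]
        · exact h
      rw [List.getLast?_cons_cons]
      exact ih (List.sorted_cons.mp hs).2 hvt (fun x hx => hub x (List.mem_cons_of_mem _ hx))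

theorem pvSortedHeadS (bs : List Int) (v : Int) (hm : v ∈ bs) (hlb : ∀ x ∈ bs, v ≤ x) :
    (PySem.List.sorted bs (fun x => x) false).head? = some v :=
  pvSortedHead (PySem.List.sorted_pairwise bs (fun x => x))
    ((PySem.List.mem_sorted _ _ _ _).mpr hm) (fun x hx => hlb x ((PySem.List.mem_sorted _ _ _ _).mp hx))

theorem pvSortedLastS (bs : List Int) (v : Int) (hm : v ∈ bs) (hub : ∀ x ∈ bs, x ≤ v) :
    (PySem.List.sorted bs (fun x => x) false).getLast? = some v :=
  pvSortedLast (PySem.List.sorted_pairwise bs (fun x => x))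
    ((PySem.List.mem_sorted _ _ _ _).mpr hm) (fun x hx => hub x ((PySem.List.mem_sorted _ _ _ _).mp hx))

theorem pvDecomp (s : List Int) (h : 2 ≤ s.length) : ∃ a m b, s = a :: m ++ [b] := by
  cases s with
  | nil => simp at h
  | cons a t =>
    have ht : t ≠ [] := by intro h'; subst h'; simp at h
    exact ⟨a, t.dropLast, t.getLast ht, congrArg (a :: ·) (List.dropLast_concat_getLast ht).symm⟩

theorem pvBumpA_eq (a b : Int) (m : List Int) :
    pvBumpA (a :: m ++ [b]) = (a + 1) :: m ++ [b - 1] := by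
  show ((a + 1) :: (m ++ [b])).dropLast ++ [((a + 1) :: (m ++ [b])).getLast?.getD 0 - 1] = _
  rw [show (a + 1) :: (m ++ [b]) = ((a + 1) :: m) ++ [b] by simp]
  rw [List.dropLast_concat, List.getLast?_concat]
  simp

-- the main loop invariant: A's sorted list s and B's (cnt, lo, hi, n) describe the same multiset
theorem pvLoop_eq (f : Nat) : ∀ (s : List Int) (cnt : PySem.Dict Int Int) (lo hi n : Int)
    (diff : Option Int), s.Sorted (· ≤ ·) →
    (∀ k : Int, cnt.getD k 0 = (s.count k : Int)) →
    s.head? = some lo → s.getLast? = some hi → n = (s.length : Int) → 1 ≤ s.length →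
    pvLoopA f s diff = pvLoopB f cnt lo hi n diff := by
  induction f with
  | zero => intro s cnt lo hi n diff _ _ _ _ _ _; rfl
  | succ f ih =>
    intro s cnt lo hi n diff hsort hcnt hhead hlast hn hlen
    subst hn
    by_cases h1 : s.length = 1
    · obtain ⟨x, rfl⟩ := List.length_eq_one_iff.mp h1
      have hb : pvBumpA [x] = [x] := by
        show ([x + 1].dropLast) ++ [[x + 1].getLast?.getD 0 - 1] = [x]
        simp
      have hs1 : PySem.List.sorted [x] (fun x => x) false = [x] :=
        PySem.List.sorted_eq_self_of_pairwise _ _ (by simp)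
      simp [pvLoopA, pvLoopB, hb, hs1]
    · have h2 : 2 ≤ s.length := by omega
      obtain ⟨a, m, b, rfl⟩ := pvDecomp s h2
      have hlo : lo = a := by simp at hhead; omega
      have hhi : hi = b := by
        have hgl : (a :: m ++ [b]).getLast? = some b := by
          rw [show a :: m ++ [b] = (a :: m) ++ [b] by simp, List.getLast?_concat]
        rw [hgl] at hlast; injection hlast with h'; omega
      rw [hlo, hhi]
      have hma : ∀ x ∈ m, a ≤ x := fun x hx => (List.pairwise_cons.mp hsort).1 x (by simp [hx])
      have hba : a ≤ b := (List.pairwise_cons.mp hsort).1 b (by simp)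
      have hmb : ∀ x ∈ m, x ≤ b := by
        have hp := (List.pairwise_append.mp (List.pairwise_cons.mp hsort).2).2.2
        intro x hx; exact hp x hx b (by simp)
      have hbump := pvBumpA_eq a b m
      have hcs : ∀ k : Int, ((a :: m ++ [b]).count k : Int)
          = (m.count k : Int) + (if k = a then 1 else 0) + (if k = b then 1 else 0) := by
        intro k
        simp [List.count_cons, List.count_append]
        split_ifs <;> omega
      have hbc : ∀ k : Int, (((a + 1) :: m ++ [b - 1]).count k : Int)
          = (m.count k : Int) + (if k = a + 1 then 1 else 0) + (if k = b - 1 then 1 else 0) := by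
        intro k
        simp [List.count_cons, List.count_append]
        split_ifs <;> omega
      have hne1 : ((a :: m ++ [b]).length : Int) ≠ 1 := by simp; omega
      have hlen' : 1 ≤ ((a + 1) :: m ++ [b - 1]).length := by simp
      have hlenS : (PySem.List.sorted ((a + 1) :: m ++ [b - 1]) (fun x => x) false).length
          = (a :: m ++ [b]).length := by rw [PySem.List.length_sorted]; simp
      by_cases hab : a = b
      · subst hab
        have hmm : ∀ x ∈ m, x = a := fun x hx => le_antisymm (hmb x hx) (hma x hx)
        have hhead' : (PySem.List.sorted ((a + 1) :: m ++ [a - 1]) (fun x => x) false).head?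
            = some (a - 1) := by
          apply pvSortedHeadS _ _ (by simp)
          intro x hx
          rcases List.mem_cons.mp hx with h' | h'
          · omega
          · rcases List.mem_append.mp h' with h'' | h''
            · have := hmm x h''; omega
            · simp at h''; omega
        have hlast' : (PySem.List.sorted ((a + 1) :: m ++ [a - 1]) (fun x => x) false).getLast?
            = some (a + 1) := by
          apply pvSortedLastS _ _ (by simp)
          intro x hx
          rcases List.mem_cons.mp hx with h' | h'
          · omega
          · rcases List.mem_append.mp h' with h'' | h''
            · have := hmm x h''; omega
            · simp at h''; omega
        have hcnt3 : ∀ k : Int,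
            (((cnt.insert a (cnt.getD a 0 - 2)).insert (a + 1)
                ((cnt.insert a (cnt.getD a 0 - 2)).getD (a + 1) 0 + 1)).insert (a - 1)
                (((cnt.insert a (cnt.getD a 0 - 2)).insert (a + 1)
                  ((cnt.insert a (cnt.getD a 0 - 2)).getD (a + 1) 0 + 1)).getD (a - 1) 0 + 1)).getD k 0
            = ((PySem.List.sorted ((a + 1) :: m ++ [a - 1]) (fun x => x) false).count k : Int) := by
          intro k
          rw [(PySem.List.sorted_perm _ _ _).count_eq k]
          simp only [PySem.Dict.getD_insert, hcnt, hcs, hbc]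
          split_ifs <;> first | omega | (subst_vars; omega)
        simp only [pvLoopA, pvLoopB, hbump, if_neg hne1, hhead', hlast']
        norm_num
        exact ih _ _ _ _ _ _ (PySem.List.sorted_pairwise _ _) hcnt3 hhead' hlast'
          (by simp [PySem.List.length_sorted]) (by simp [PySem.List.length_sorted])
      · have hab' : a < b := lt_of_le_of_ne hba hab
        simp only [pvLoopA, pvLoopB, hbump, if_neg hne1, if_neg hab]
        set cnt1 := cnt.insert a (cnt.getD a 0 - 1) with hd1
        set cnt2 := cnt1.insert (a + 1) (cnt1.getD (a + 1) 0 + 1) with hd2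
        set cnt3 := cnt2.insert b (cnt2.getD b 0 - 1) with hd3
        set cnt4 := cnt3.insert (b - 1) (cnt3.getD (b - 1) 0 + 1) with hd4
        have e1 : ∀ k : Int, cnt1.getD k 0 = cnt.getD k 0 + (if k = a then -1 else 0) := by
          intro k; rw [hd1, PySem.Dict.getD_insert]; split_ifs with h <;> [subst h; skip] <;> omega
        have e2 : ∀ k : Int, cnt2.getD k 0 = cnt1.getD k 0 + (if k = a + 1 then 1 else 0) := by
          intro k; rw [hd2, PySem.Dict.getD_insert]; split_ifs with h <;> [subst h; skip] <;> omega
        have e3 : ∀ k : Int, cnt3.getD k 0 = cnt2.getD k 0 + (if k = b then -1 else 0) := by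
          intro k; rw [hd3, PySem.Dict.getD_insert]; split_ifs with h <;> [subst h; skip] <;> omega
        have e4 : ∀ k : Int, cnt4.getD k 0 = cnt3.getD k 0 + (if k = b - 1 then 1 else 0) := by
          intro k; rw [hd4, PySem.Dict.getD_insert]; split_ifs with h <;> [subst h; skip] <;> omega
        have hcbs : ∀ k : Int, cnt4.getD k 0 = (((a + 1) :: m ++ [b - 1]).count k : Int) := by
          intro k
          rw [e4, e3, e2, e1]
          simp only [hcnt, hcs, hbc]
          split_ifs <;> omega
        have hcnt4 : ∀ k : Int, cnt4.getD k 0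
            = ((PySem.List.sorted ((a + 1) :: m ++ [b - 1]) (fun x => x) false).count k : Int) := by
          intro k; rw [hcbs, (PySem.List.sorted_perm _ _ _).count_eq k]
        have hH : (PySem.List.sorted ((a + 1) :: m ++ [b - 1]) (fun x => x) false).head?
            = some (if cnt4.getD a 0 = 0 then a + 1 else a) := by
          by_cases hca : cnt4.getD a 0 = 0
          · rw [if_pos hca]
            have hnot : a ∉ (a + 1) :: m ++ [b - 1] := by
              rw [← List.count_eq_zero]
              have := hcbs a; omega
            apply pvSortedHeadS _ _ (by simp)
            intro x hx
            rcases List.mem_cons.mp hx with h' | h'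
            · omega
            · rcases List.mem_append.mp h' with h'' | h''
              · have h3 := hma x h''
                have h4 : x ≠ a := fun he => hnot (by rw [← he]; exact List.mem_cons_of_mem _ (List.mem_append.mpr (Or.inl h'')))
                omega
              · simp at h''
                have h4 : b - 1 ≠ a := fun he => hnot (by rw [← he]; simp)
                omega
          · rw [if_neg hca]
            have hmem : a ∈ (a + 1) :: m ++ [b - 1] := by
              have := hcbs a
              have hpos : 0 < ((a + 1) :: m ++ [b - 1]).count a := by omega
              exact List.count_pos_iff.mp hpos
            apply pvSortedHeadS _ _ hmem
            intro x hx
            rcases List.mem_cons.mp hx with h' | h'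
            · omega
            · rcases List.mem_append.mp h' with h'' | h''
              · have := hma x h''; omega
              · simp at h''; omega
        have hL : (PySem.List.sorted ((a + 1) :: m ++ [b - 1]) (fun x => x) false).getLast?
            = some (if cnt4.getD b 0 = 0 then b - 1 else b) := by
          by_cases hcb : cnt4.getD b 0 = 0
          · rw [if_pos hcb]
            have hnot : b ∉ (a + 1) :: m ++ [b - 1] := by
              rw [← List.count_eq_zero]
              have := hcbs b; omega
            apply pvSortedLastS _ _ (by simp)
            intro x hx
            rcases List.mem_cons.mp hx with h' | h'
            · have h4 : a + 1 ≠ b := fun he => hnot (by rw [← he]; simp)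
              omega
            · rcases List.mem_append.mp h' with h'' | h''
              · have h3 := hmb x h''
                have h4 : x ≠ b := fun he => hnot (by rw [← he]; exact List.mem_cons_of_mem _ (List.mem_append.mpr (Or.inl h'')))
                omega
              · simp at h''; omega
          · rw [if_neg hcb]
            have hmem : b ∈ (a + 1) :: m ++ [b - 1] := by
              have := hcbs b
              have hpos : 0 < ((a + 1) :: m ++ [b - 1]).count b := by omega
              exact List.count_pos_iff.mp hpos
            apply pvSortedLastS _ _ hmem
            intro x hx
            rcases List.mem_cons.mp hx with h' | h'
            · omega
            · rcases List.mem_append.mp h' with h'' | h''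
              · have := hmb x h''; omega
              · simp at h''; omega
        rw [hH, hL]
        by_cases hca : cnt4.getD a 0 = 0 <;> by_cases hcb : cnt4.getD b 0 = 0 <;>
          simp only [hca, hcb, if_true, if_false, Option.getD_some] <;>
          split_ifs <;>
          first
            | rfl
            | (exact ih _ _ _ _ _ _ (PySem.List.sorted_pairwise _ _) hcnt4
                (by rw [hH]; simp [hca, hcb]) (by rw [hL]; simp [hca, hcb])
                (by simp [PySem.List.length_sorted]) (by simp [PySem.List.length_sorted]))

theorem pvGo_eq : ∀ (tc : List (Int × List Int)) (i : Int) (diff : Option Int),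
    (∀ p ∈ tc, 1 ≤ p.1 → p.2 ≠ []) → pvGoA tc i diff = pvGoB tc i diff := by
  intro tc
  induction tc with
  | nil => intro i diff _; rfl
  | cons p rest ih =>
    intro i diff h
    obtain ⟨d, hs⟩ := p
    by_cases hd : 1 ≤ d
    · have hne : hs ≠ [] := h (d, hs) List.mem_cons_self hd
      obtain ⟨mn, hmn⟩ : ∃ mn, PySem.List.min? hs (fun x => x) = some mn := by
        cases hmin : PySem.List.min? hs (fun x => x) with
        | none => exact absurd ((PySem.List.min?_eq_none_iff _ _).mp hmin) hne
        | some m => exact ⟨m, rfl⟩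
      obtain ⟨mx, hmx⟩ : ∃ mx, PySem.List.max? hs (fun x => x) = some mx := by
        cases hmax : PySem.List.max? hs (fun x => x) with
        | none => exact absurd ((PySem.List.max?_eq_none_iff _ _).mp hmax) hne
        | some m => exact ⟨m, rfl⟩
      have hloop : pvLoopA d.toNat (PySem.List.sorted hs (fun x => x) false) diff =
          pvLoopB d.toNat (hs.foldl (fun c h => c.insert h (c.getD h 0 + 1)) PySem.Dict.empty)
            ((PySem.List.min? hs (fun x => x)).getD 0) ((PySem.List.max? hs (fun x => x)).getD 0)
            (hs.length : Int) diff := by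
        rw [hmn, hmx]
        apply pvLoop_eq
        · exact PySem.List.sorted_pairwise hs (fun x => x)
        · intro k
          rw [PySem.Dict.foldl_insert_getD_add_one_eq_counter, PySem.Dict.getD_counter]
          rw [((PySem.List.sorted_perm hs (fun x => x) false).count_eq k)]
        · exact pvSortedHeadS hs mn (PySem.List.min?_mem hmn) (PySem.List.min?_isMin hmn)
        · exact pvSortedLastS hs mx (PySem.List.max?_mem hmx) (PySem.List.max?_isMax hmx)
        · rw [PySem.List.length_sorted]
        · have : hs.length ≠ 0 := fun h0 => hne (List.length_eq_zero_iff.mp h0)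
          rw [PySem.List.length_sorted]; omega
      simp only [pvGoA, pvGoB, if_pos hd]
      rw [hloop]
      exact congrArg _ (ih (i + 1) _ (fun p hp => h p (List.mem_cons_of_mem _ hp)))
    · have hz : d.toNat = 0 := by omega
      simp only [pvGoA, pvGoB, hz, if_neg hd, pvLoopA]
      exact congrArg _ (ih (i + 1) diff (fun p hp => h p (List.mem_cons_of_mem _ hp)))

-- ===== VERDICT (by name: the statement is the Claim_ definition above) =====
theorem flattern_boxes_spec : Claim_equal_flattern_boxes := by
  intro tc _ hpre
  unfold Spec_flattern_boxes flattern_boxes flattern_boxes_alt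
  apply pvGo_eq
  intro p hp h1
  obtain ⟨k, hk, rfl⟩ := List.mem_iff_getElem.mp hp
  have := (hpre k hk).1
  rw [List.getD_eq_getElem _ _ hk] at this
  exact this h1
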